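-- pv_equiv track=rewrite | github.com/vishnuchakr/fa18-hw-ref | hw4-soln.py | alphabet_finder
-- ===== SOURCE A (Python) =====
-- def alphabet_finder(s):
-- 	letterLocations = {}
--
-- 	for i, c in enumerate(s.lower()):
-- 		if c not in 'qwertyuiopasdfghjklzxcvbnm':
-- 			continue  # we don't care about anything but letters
-- 		if c in letterLocations:
-- 			continue
-- 		letterLocations[c] = i
--
-- 	if len(letterLocations) < 26:
-- 		return None
--
-- 	# we want the last letter that appears, hence the +1...
-- 	return s[:max(letterLocations.values())+1]
-- ===== SOURCE B (Python) =====
-- def alphabet_finder(s):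
--     seen = set()
--     for i, c in enumerate(s.lower()):
--         if 'a' <= c <= 'z' and c not in seen:
--             seen.add(c)
--             if len(seen) == 26:
--                 return s[:i+1]
--     return None
-- ===== Notes on version B (the rewrite author's own statement) =====
-- stated objective: alternative
-- what changed: Replaces A's build-a-full-first-occurrence-dict-then-max-reduce with a single early-terminating pass that keeps only a set of distinct letters and returns s[:i+1] at the index where the 26th distinct letter first appears.
import Mathlib
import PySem

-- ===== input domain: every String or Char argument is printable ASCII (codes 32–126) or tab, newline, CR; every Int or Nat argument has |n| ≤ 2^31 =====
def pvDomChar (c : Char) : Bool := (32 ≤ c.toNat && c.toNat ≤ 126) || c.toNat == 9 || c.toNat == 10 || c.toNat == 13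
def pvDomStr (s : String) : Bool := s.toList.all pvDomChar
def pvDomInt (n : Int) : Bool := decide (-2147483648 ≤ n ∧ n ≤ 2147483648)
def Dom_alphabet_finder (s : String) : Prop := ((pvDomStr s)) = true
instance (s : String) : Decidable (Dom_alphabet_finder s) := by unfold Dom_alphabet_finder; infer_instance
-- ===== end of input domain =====

-- B replaces the full-dict-then-max pass with one early-terminating scan keeping a set of letters seen.

-- ===== PORT A =====
def pvKeyboard : List Char := "qwertyuiopasdfghjklzxcvbnm".toList

def pvAStep (d : PySem.Dict Char Int) (p : Int × Char) : PySem.Dict Char Int :=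
  if !(pvKeyboard.contains p.2) then d
  else if d.contains p.2 then d
  else d.insert p.2 p.1

def alphabet_finder (s : String) : Option String :=
  let letterLocations :=
    (PySem.List.enumerate (PySem.Str.lower s).toList 0).foldl pvAStep PySem.Dict.empty
  if letterLocations.size < 26 then none
  else
    -- max(values): the size guard proves the list nonempty, so the getD default is unreachable
    some (PySem.Str.slice s none
      (some ((PySem.List.max? letterLocations.values (fun x => x)).getD 0 + 1)))

-- ===== PORT B =====
def pvBLoop (s : String) (l : List (Int × Char)) (seen : PySem.Set Char) : Option String :=
  match l with
  | [] => none
  | (i, c) :: rest =>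
    if ('a' ≤ c && c ≤ 'z') && !(PySem.Set.contains seen c) then
      if PySem.Set.len (PySem.Set.add seen c) == 26 then
        some (PySem.Str.slice s none (some (i + 1)))
      else pvBLoop s rest (PySem.Set.add seen c)
    else pvBLoop s rest seen

def alphabet_finder_alt (s : String) : Option String :=
  pvBLoop s (PySem.List.enumerate (PySem.Str.lower s).toList 0) PySem.Set.empty

-- ===== PRECONDITION & SPEC =====
def Spec_alphabet_finder (s : String) (out : Option String) : Prop := out = alphabet_finder_alt s
instance (s : String) (out : Option String) : Decidable (Spec_alphabet_finder s out) := by unfold Spec_alphabet_finder; infer_instance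

-- ===== CLAIM (what is proved, stated in full; the proofs are below) =====
def Claim_equal_alphabet_finder : Prop := ∀ (s : String), Dom_alphabet_finder s → Spec_alphabet_finder s (alphabet_finder s)

-- ===== LEMMAS AND PROOFS =====

-- a = b on Char iff the code points agree
theorem pvCharEq (a b : Char) : a = b ↔ a.toNat = b.toNat := by
  constructor
  · rintro rfl; rfl
  · intro h; apply Char.ext; simp [UInt32.ext_iff] at *; omega

-- membership in A's keyboard string is B's 'a' ≤ c ≤ 'z' test
lemma pvKeyboard_mem (c : Char) : pvKeyboard.contains c = ('a' ≤ c && c ≤ 'z') := by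
  have h : pvKeyboard = ['q','w','e','r','t','y','u','i','o','p','a','s','d','f','g','h','j','k','l','z','x','c','v','b','n','m'] := by decide
  rw [h, show ('a' ≤ c && c ≤ 'z') = decide (97 ≤ c.toNat ∧ c.toNat ≤ 122) by
    simp [Char.le_def, UInt32.le_iff_toNat_le]]
  simp only [List.contains_eq_mem, List.mem_cons, List.not_mem_nil, or_false, decide_eq_decide,
    pvCharEq, (show ('q').toNat = 113 from by decide), (show ('w').toNat = 119 from by decide), (show ('e').toNat = 101 from by decide), (show ('r').toNat = 114 from by decide), (show ('t').toNat = 116 from by decide), (show ('y').toNat = 121 from by decide), (show ('u').toNat = 117 from by decide), (show ('i').toNat = 105 from by decide), (show ('o').toNat = 111 from by decide), (show ('p').toNat = 112 from by decide), (show ('a').toNat = 97 from by decide), (show ('s').toNat = 115 from by decide), (show ('d').toNat = 100 from by decide), (show ('f').toNat = 102 from by decide), (show ('g').toNat = 103 from by decide), (show ('h').toNat = 104 from by decide), (show ('j').toNat = 106 from by decide), (show ('k').toNat = 107 from by decide), (show ('l').toNat = 108 from by decide), (show ('z').toNat = 122 from by decide), (show ('x').toNat = 120 from by decide), (show ('c').toNat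 = 99 from by decide), (show ('v').toNat = 118 from by decide), (show ('b').toNat = 98 from by decide), (show ('n').toNat = 110 from by decide), (show ('m').toNat = 109 from by decide)]
  omega

-- one step of A's fold, spelled out for each branch
lemma pvAStep_not_letter (d : PySem.Dict Char Int) (p : Int × Char)
    (h : pvKeyboard.contains p.2 = false) : pvAStep d p = d := by
  unfold pvAStep; rw [h]; rfl

lemma pvAStep_contains (d : PySem.Dict Char Int) (p : Int × Char)
    (h : pvKeyboard.contains p.2 = true) (hc : d.contains p.2 = true) : pvAStep d p = d := by
  unfold pvAStep; rw [h, hc]; rfl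

lemma pvAStep_new (d : PySem.Dict Char Int) (p : Int × Char)
    (h : pvKeyboard.contains p.2 = true) (hc : d.contains p.2 = false) :
    pvAStep d p = d.insert p.2 p.1 := by
  unfold pvAStep; rw [h, hc]; rfl

-- once the dict holds every keyboard letter, A's fold is the identity
lemma pv_fold_full (l : List (Int × Char)) (d : PySem.Dict Char Int)
    (h : ∀ x ∈ pvKeyboard, d.contains x = true) :
    l.foldl pvAStep d = d := by
  induction l with
  | nil => rfl
  | cons p rest ih =>
    have hstep : pvAStep d p = d := by
      cases hcb : pvKeyboard.contains p.2 with
      | false => exact pvAStep_not_letter d p hcb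
      | true => exact pvAStep_contains d p hcb (h p.2 (List.contains_iff_mem.mp hcb))
    rw [List.foldl_cons, hstep, ih]

-- 26 distinct keyboard letters are all 26 of them
lemma pv_keys_full (d : PySem.Dict Char Int) (hnd : d.keys.Nodup)
    (hsub : ∀ x ∈ d.keys, x ∈ pvKeyboard) (hlen : d.keys.length = 26) :
    ∀ x ∈ pvKeyboard, d.contains x = true := by
  intro x hx
  have hkb : pvKeyboard.Nodup := by decide
  have hsub' : d.keys.toFinset ⊆ pvKeyboard.toFinset := by
    intro y hy; simp only [List.mem_toFinset] at *; exact hsub y hy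
  have hcard : pvKeyboard.toFinset.card ≤ d.keys.toFinset.card := by
    rw [List.toFinset_card_of_nodup hnd, List.toFinset_card_of_nodup hkb, hlen]; decide
  have heq := Finset.eq_of_subset_of_card_le hsub' hcard
  exact (PySem.Dict.contains_iff_mem_keys d x).mpr
    (by simpa using (heq ▸ (List.mem_toFinset.mpr hx) : x ∈ d.keys.toFinset))

lemma pv_foldl_max_lt (m : Int) (l : List Int) (a : Int) (ha : a < m)
    (hl : ∀ v ∈ l, v < m) : l.foldl max a < m := by
  induction l generalizing a with
  | nil => simpa using ha
  | cons v t ih =>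
    exact ih (max a v) (max_lt ha (hl v (by simp))) (fun w hw => hl w (by simp [hw]))

-- the last value appended is the max when everything before it is smaller
lemma pv_max_append (vs : List Int) (m : Int) (h : ∀ v ∈ vs, v < m) :
    PySem.List.max? (vs ++ [m]) (fun x => x) = some m := by
  cases vs with
  | nil => simp [PySem.List.max?_id_cons]
  | cons v vs' =>
    rw [List.cons_append, PySem.List.max?_id_cons, List.foldl_append]
    have hlt : vs'.foldl max v < m :=
      pv_foldl_max_lt m vs' v (h v (by simp)) (fun w hw => h w (by simp [hw]))
    simp [max_eq_right (le_of_lt hlt)]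

-- the loop invariant: B's running set IS the key list of A's dict-so-far
lemma pv_main (s : String) (cs : List Char) (k : Int) (d : PySem.Dict Char Int)
    (hkeys : ∀ x ∈ d.keys, x ∈ pvKeyboard) (hnd : d.keys.Nodup)
    (hvals : ∀ v ∈ d.values, v < k)
    (hsize : d.size < 26) :
    pvBLoop s (PySem.List.enumerate cs k) d.keys =
      (if ((PySem.List.enumerate cs k).foldl pvAStep d).size < 26 then none
       else some (PySem.Str.slice s none
        (some ((PySem.List.max? ((PySem.List.enumerate cs k).foldl pvAStep d).values (fun x => x)).getD 0 + 1)))) := by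
  induction cs generalizing k d with
  | nil =>
    simp only [PySem.List.enumerate_nil, List.foldl_nil]
    rw [pvBLoop, if_pos hsize]
  | cons c cs' ih =>
    rw [PySem.List.enumerate_cons]
    have hsz : d.size = d.keys.length := by simp [PySem.Dict.size, PySem.Dict.keys]
    by_cases hl : ('a' ≤ c && c ≤ 'z') = true
    · by_cases hc : d.contains c = true
      · -- letter already recorded: both sides skip
        have hmem : PySem.Set.contains d.keys c = true := by
          have := (PySem.Dict.contains_iff_mem_keys d c).mp hc
          simpa [PySem.Set.contains, List.contains_iff_mem] using this
        rw [pvBLoop]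
        rw [show (('a' ≤ c && c ≤ 'z') && !PySem.Set.contains d.keys c) = false by
          rw [hl, hmem]; rfl]
        rw [if_neg (by simp), List.foldl_cons,
          pvAStep_contains d (k, c) (by rw [pvKeyboard_mem]; exact hl) hc]
        exact ih (k + 1) d hkeys hnd (fun v hv => lt_trans (hvals v hv) (by omega)) hsize
      · -- a new letter
        have hcf : d.contains c = false := by simpa using hc
        have hnotmem : c ∉ d.keys := fun hm => hc ((PySem.Dict.contains_iff_mem_keys d c).mpr hm)
        have hmem : PySem.Set.contains d.keys c = false := by
          simpa [PySem.Set.contains, List.contains_iff_mem] using hnotmem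
        have hkeys' : (d.insert c k).keys = d.keys ++ [c] :=
          PySem.Dict.keys_insert_of_not_contains d k hcf
        have hitems' : (d.insert c k).items = d.items ++ [(c, k)] :=
          PySem.Dict.items_insert_of_not_contains d k hcf
        have hvalues' : (d.insert c k).values = d.values ++ [k] := by
          simp [PySem.Dict.values, hitems']
        have hsize' : (d.insert c k).size = d.size + 1 := by
          simp [PySem.Dict.size, hitems']
        have hnd' : (d.insert c k).keys.Nodup := by
          rw [hkeys', List.nodup_append]
          refine ⟨hnd, List.nodup_singleton c, ?_⟩
          intro a ha b hb
          simp only [List.mem_singleton] at hb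
          subst hb
          exact fun h => hnotmem (h ▸ ha)
        have hkeysub' : ∀ x ∈ (d.insert c k).keys, x ∈ pvKeyboard := by
          intro x hx; rw [hkeys'] at hx
          rcases List.mem_append.mp hx with hx | hx
          · exact hkeys x hx
          · simp only [List.mem_singleton] at hx; subst hx
            exact List.contains_iff_mem.mp (by rw [pvKeyboard_mem]; exact hl)
        have hadd : PySem.Set.add d.keys c = (d.insert c k).keys := by
          rw [hkeys']; simp [PySem.Set.add, hnotmem]
        rw [pvBLoop]
        rw [show (('a' ≤ c && c ≤ 'z') && !PySem.Set.contains d.keys c) = true by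
          rw [hl, hmem]; rfl]
        rw [if_pos rfl, hadd, List.foldl_cons,
          pvAStep_new d (k, c) (by rw [pvKeyboard_mem]; exact hl) hcf]
        have hlenkeys : PySem.Set.len ((d.insert c k).keys) = ((d.size : Int) + 1) := by
          simp [PySem.Set.len, hkeys', ← hsz]
        by_cases h26 : d.size + 1 = 26
        · -- the 26th distinct letter: B returns here, A's dict is already full
          have hkful : ∀ x ∈ pvKeyboard, (d.insert c k).contains x = true := by
            apply pv_keys_full _ hnd' hkeysub'
            rw [hkeys']; simp [← hsz]; omega
          rw [pv_fold_full _ _ hkful]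
          have hmax : PySem.List.max? (d.insert c k).values (fun x => x) = some k := by
            rw [hvalues']; exact pv_max_append d.values k hvals
          rw [if_pos (by rw [hlenkeys]; simp; omega), if_neg (by omega), hmax]
          rfl
        · -- still fewer than 26 letters: recurse
          rw [if_neg (by rw [hlenkeys]; simp; omega)]
          refine ih (k + 1) (d.insert c k) hkeysub' hnd' ?_ (by omega)
          intro v hv; rw [hvalues'] at hv
          rcases List.mem_append.mp hv with hv | hv
          · exact lt_trans (hvals v hv) (by omega)
          · simp only [List.mem_singleton] at hv; omega
    · -- not a letter: both sides skip
      have hlf : ('a' ≤ c && c ≤ 'z') = false := by simpa using hl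
      rw [pvBLoop]
      rw [show (('a' ≤ c && c ≤ 'z') && !PySem.Set.contains d.keys c) = false by
        rw [hlf]; rfl]
      rw [if_neg (by simp), List.foldl_cons,
        pvAStep_not_letter d (k, c) (by rw [pvKeyboard_mem]; exact hlf)]
      exact ih (k + 1) d hkeys hnd (fun v hv => lt_trans (hvals v hv) (by omega)) hsize

-- ===== VERDICT (by name: the statement is the Claim_ definition above) =====
theorem alphabet_finder_spec : Claim_equal_alphabet_finder := by
  intro s _
  unfold Spec_alphabet_finder alphabet_finder alphabet_finder_alt
  have h := pv_main s (PySem.Str.lower s).toList 0 PySem.Dict.empty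
    (by simp [PySem.Dict.keys_empty]) (by simp [PySem.Dict.keys_empty])
    (by simp [PySem.Dict.empty]) (by simp [PySem.Dict.size_empty])
  simpa [PySem.Set.empty, PySem.Dict.keys_empty] using h.symm
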